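-- pv_equiv track=rewrite | github.com/ocansey11/functiongemma-hackathon | prompts.py | build_cot_messages
-- ===== SOURCE A (Python) =====
-- COT_SUFFIX = (
--     "\n\nBefore calling any tools, think step by step:\n"
--     "- How many distinct actions am I being asked to perform?\n"
--     "- Which tool matches each action?\n"
--     "- What are the exact argument values?\n"
--     "Then call all required tools."
-- )
--
-- def build_cot_messages(messages: list) -> list:
--     """Append CoT reasoning suffix to the last user message."""
--     result = []
--     for i, m in enumerate(messages):
--         if m["role"] == "user" and i == len(messages) - 1:
--             result.append({"role": "user", "content": m["content"] + COT_SUFFIX})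
--         else:
--             result.append(m)
--     return result
-- ===== SOURCE B (Python) =====
-- COT_SUFFIX = (
--     "\n\nBefore calling any tools, think step by step:\n"
--     "- How many distinct actions am I being asked to perform?\n"
--     "- Which tool matches each action?\n"
--     "- What are the exact argument values?\n"
--     "Then call all required tools."
-- )
--
-- def build_cot_messages(messages: list) -> list:
--     """Append CoT reasoning suffix to the last user message."""
--     if not messages:
--         return []
--     head = messages[0]
--     tail = messages[1:]
--     if tail:
--         return [head] + build_cot_messages(tail)
--     if head["role"] == "user":
--         return [{"role": "user", "content": head["content"] + COT_SUFFIX}]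
--     return [head]
-- ===== Notes on version B (the rewrite author's own statement) =====
-- stated objective: alternative
-- what changed: B recurses on the structure of the list (copy the head, recurse on the tail, handle the role check only in the singleton base case) instead of A's indexed enumerate loop that tests every element's index and role against the length.
import Mathlib
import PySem

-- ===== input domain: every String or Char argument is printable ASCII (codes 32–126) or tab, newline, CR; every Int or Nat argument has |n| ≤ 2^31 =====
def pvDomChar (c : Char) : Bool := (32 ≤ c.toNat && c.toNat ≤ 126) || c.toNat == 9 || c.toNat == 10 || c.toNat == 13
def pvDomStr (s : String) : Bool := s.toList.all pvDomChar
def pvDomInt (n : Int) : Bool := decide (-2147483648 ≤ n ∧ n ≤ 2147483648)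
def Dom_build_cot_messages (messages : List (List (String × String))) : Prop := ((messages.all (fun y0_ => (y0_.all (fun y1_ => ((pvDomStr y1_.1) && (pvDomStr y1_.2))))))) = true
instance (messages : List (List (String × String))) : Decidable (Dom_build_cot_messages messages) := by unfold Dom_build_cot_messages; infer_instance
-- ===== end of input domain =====

-- B recurses on the list structure (head copied, recurse on tail, role check only in
-- the singleton base case) instead of A's enumerate loop testing every index; objective: alternative.


def cotSuffix : String :=
  "\n\nBefore calling any tools, think step by step:\n- How many distinct actions am I being asked to perform?\n- Which tool matches each action?\n- What are the exact argument values?\nThen call all required tools."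

-- m[k] on an association-list dict: first match; KeyError (excluded by Pre_) defaults to ""
def dictGet (m : List (String × String)) (k : String) : String :=
  (List.lookup k m).getD ""

-- ===== PORT A =====
def build_cot_messages (messages : List (List (String × String))) : List (List (String × String)) :=
  (PySem.List.enumerate messages).foldl
    (fun result im =>
      if dictGet im.2 "role" == "user" && im.1 == (messages.length : Int) - 1 then
        result ++ [[("role", "user"), ("content", dictGet im.2 "content" ++ cotSuffix)]]
      else
        result ++ [im.2])
    []

-- ===== PORT B =====
def build_cot_messages_alt : List (List (String × String)) → List (List (String × String))
  | [] => []
  | head :: tail =>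
    match tail with
    | _ :: _ => head :: build_cot_messages_alt tail
    | [] =>
      if dictGet head "role" == "user" then
        [[("role", "user"), ("content", dictGet head "content" ++ cotSuffix)]]
      else
        [head]

-- ===== PRECONDITION & SPEC =====
-- Pre_ excludes exactly the inputs where the Python A raises KeyError: a message without
-- a "role" key, or a last user message without a "content" key.
def Pre_build_cot_messages (messages : List (List (String × String))) : Prop :=
  (∀ m ∈ messages, (List.lookup "role" m).isSome) ∧
  (∀ last, messages.getLast? = some last →
    List.lookup "role" last = some "user" → (List.lookup "content" last).isSome)
instance (messages : List (List (String × String))) : Decidable (Pre_build_cot_messages messages) := by unfold Pre_build_cot_messages; infer_instance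

def pvWitness_build_cot_messages : (List (List (String × String))) :=
  [[("role", "system"), ("content", "be brief")], [("role", "user"), ("content", "hi")]]

def Spec_build_cot_messages (messages : List (List (String × String))) (out : List (List (String × String))) : Prop := out = build_cot_messages_alt messages
instance (messages : List (List (String × String))) (out : List (List (String × String))) : Decidable (Spec_build_cot_messages messages out) := by unfold Spec_build_cot_messages; infer_instance

-- ===== CLAIM (what is proved, stated in full; the proofs are below) =====
def Claim_equal_build_cot_messages : Prop := ∀ (messages : List (List (String × String))), Dom_build_cot_messages messages → Pre_build_cot_messages messages → Spec_build_cot_messages messages (build_cot_messages messages)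

-- ===== LEMMAS AND PROOFS =====

theorem fst_enumerate_bounds {α : Type} (xs : List α) (s : Int) (p : Int × α)
    : p ∈ PySem.List.enumerate xs s → s ≤ p.1 ∧ p.1 < s + xs.length := by
  induction xs generalizing s with
  | nil => intro h; simp [PySem.List.enumerate] at h
  | cons x xs ih =>
    intro h
    rw [PySem.List.enumerate_cons] at h
    rcases List.mem_cons.mp h with h | h
    · subst h; simp
    · have := ih (s + 1) h
      simp only [List.length_cons]
      push_cast
      omega

theorem build_cot_messages_eq_map (messages : List (List (String × String))) :
    build_cot_messages messages =
      (PySem.List.enumerate messages).map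
        (fun im =>
          if dictGet im.2 "role" == "user" && im.1 == (messages.length : Int) - 1 then
            [("role", "user"), ("content", dictGet im.2 "content" ++ cotSuffix)]
          else im.2) := by
  unfold build_cot_messages
  rw [show (fun (result : List (List (String × String))) (im : Int × List (String × String)) =>
      if dictGet im.2 "role" == "user" && im.1 == (messages.length : Int) - 1 then
        result ++ [[("role", "user"), ("content", dictGet im.2 "content" ++ cotSuffix)]]
      else result ++ [im.2]) =
    (fun result im =>
      result ++ [if dictGet im.2 "role" == "user" && im.1 == (messages.length : Int) - 1 then
        [("role", "user"), ("content", dictGet im.2 "content" ++ cotSuffix)] else im.2])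
    from by funext r im; split <;> rfl]
  simpa using PySem.List.foldl_append_singleton_eq_map _ (PySem.List.enumerate messages) []

-- B on a snoc list: the prefix is copied verbatim and the base case fires at the last element
theorem alt_concat (ys : List (List (String × String))) (z : List (String × String)) :
    build_cot_messages_alt (ys ++ [z]) = ys ++ build_cot_messages_alt [z] := by
  induction ys with
  | nil => rfl
  | cons y ys ih =>
    have h : build_cot_messages_alt (y :: (ys ++ [z])) =
        y :: build_cot_messages_alt (ys ++ [z]) := by
      cases hc : ys ++ [z] with
      | nil => simp at hc
      | cons a as => simp only [build_cot_messages_alt]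
    rw [List.cons_append, h, ih, List.cons_append]

-- ===== VERDICT (by name: the statement is the Claim_ definition above) =====
theorem build_cot_messages_spec : Claim_equal_build_cot_messages := by
  intro messages _ _
  unfold Spec_build_cot_messages
  rcases List.eq_nil_or_concat messages with rfl | ⟨ys, z, rfl⟩
  · rfl
  · rw [List.concat_eq_append]
    rw [build_cot_messages_eq_map]
    rw [PySem.List.enumerate_append]
    rw [List.map_append]
    have hys : (PySem.List.enumerate ys 0).map
        (fun im =>
          if dictGet im.2 "role" == "user" && im.1 == ((ys ++ [z]).length : Int) - 1 then
            [("role", "user"), ("content", dictGet im.2 "content" ++ cotSuffix)]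
          else im.2) = ys := by
      rw [List.map_congr_left (g := fun im => im.2), PySem.List.map_snd_enumerate]
      intro p hp
      have hb := fst_enumerate_bounds ys 0 p hp
      simp
      intro _ h1
      exfalso
      omega
    rw [hys, alt_concat]
    simp only [PySem.List.enumerate, List.map_cons, List.map_nil]
    by_cases hr : dictGet z "role" == "user"
    · simp [build_cot_messages_alt, hr]
    · simp at hr
      simp [build_cot_messages_alt, hr]
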